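-- pv_equiv track=rewrite | github.com/truptibhalekarr/insightiq | insightiq.py | get_subtitle
-- ===== SOURCE A (Python) =====
-- def get_subtitle(topic):
--     topic_lower = topic.lower()
--     if any(w in topic_lower for w in ["insurance","policy","claim","premium","coverage"]):
--         return "Analysing policyholder profiles, claim patterns, and risk distribution across the portfolio"
--     elif any(w in topic_lower for w in ["sales","revenue","profit","order","product"]):
--         return "Tracking sales performance, revenue trends, and product-level insights across the dataset"
--     elif any(w in topic_lower for w in ["spotify","music","song","track","artist","playlist"]):
--         return "Exploring streaming trends, artist performance, and audio feature patterns across tracks"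
--     elif any(w in topic_lower for w in ["employee","hr","staff","salary","workforce","attrition"]):
--         return "Understanding workforce composition, compensation trends, and employee retention patterns"
--     elif any(w in topic_lower for w in ["customer","churn","retention","user","subscriber"]):
--         return "Examining customer behaviour, engagement metrics, and churn risk indicators"
--     elif any(w in topic_lower for w in ["finance","bank","loan","credit","transaction"]):
--         return "Evaluating financial transactions, credit profiles, and risk exposure across segments"
--     elif any(w in topic_lower for w in ["health","medical","patient","hospital","disease"]):
--         return "Investigating patient demographics, clinical outcomes, and healthcare utilisation patterns"
--     elif any(w in topic_lower for w in ["marketing","campaign","ad","click","conversion"]):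
--         return "Measuring campaign effectiveness, audience engagement, and conversion performance"
--     else:
--         return f"A comprehensive data-driven analysis of {topic} — uncovering trends, patterns, and key metrics"
-- ===== SOURCE B (Python) =====
-- # Flat prioritized keyword table: (keyword, priority, subtitle).
-- ITEMS = [
--     ("insurance", 0, "Analysing policyholder profiles, claim patterns, and risk distribution across the portfolio"),
--     ("policy", 0, "Analysing policyholder profiles, claim patterns, and risk distribution across the portfolio"),
--     ("claim", 0, "Analysing policyholder profiles, claim patterns, and risk distribution across the portfolio"),
--     ("premium", 0, "Analysing policyholder profiles, claim patterns, and risk distribution across the portfolio"),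
--     ("coverage", 0, "Analysing policyholder profiles, claim patterns, and risk distribution across the portfolio"),
--     ("sales", 1, "Tracking sales performance, revenue trends, and product-level insights across the dataset"),
--     ("revenue", 1, "Tracking sales performance, revenue trends, and product-level insights across the dataset"),
--     ("profit", 1, "Tracking sales performance, revenue trends, and product-level insights across the dataset"),
--     ("order", 1, "Tracking sales performance, revenue trends, and product-level insights across the dataset"),
--     ("product", 1, "Tracking sales performance, revenue trends, and product-level insights across the dataset"),
--     ("spotify", 2, "Exploring streaming trends, artist performance, and audio feature patterns across tracks"),
--     ("music", 2, "Exploring streaming trends, artist performance, and audio feature patterns across tracks"),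
--     ("song", 2, "Exploring streaming trends, artist performance, and audio feature patterns across tracks"),
--     ("track", 2, "Exploring streaming trends, artist performance, and audio feature patterns across tracks"),
--     ("artist", 2, "Exploring streaming trends, artist performance, and audio feature patterns across tracks"),
--     ("playlist", 2, "Exploring streaming trends, artist performance, and audio feature patterns across tracks"),
--     ("employee", 3, "Understanding workforce composition, compensation trends, and employee retention patterns"),
--     ("hr", 3, "Understanding workforce composition, compensation trends, and employee retention patterns"),
--     ("staff", 3, "Understanding workforce composition, compensation trends, and employee retention patterns"),
--     ("salary", 3, "Understanding workforce composition, compensation trends, and employee retention patterns"),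
--     ("workforce", 3, "Understanding workforce composition, compensation trends, and employee retention patterns"),
--     ("attrition", 3, "Understanding workforce composition, compensation trends, and employee retention patterns"),
--     ("customer", 4, "Examining customer behaviour, engagement metrics, and churn risk indicators"),
--     ("churn", 4, "Examining customer behaviour, engagement metrics, and churn risk indicators"),
--     ("retention", 4, "Examining customer behaviour, engagement metrics, and churn risk indicators"),
--     ("user", 4, "Examining customer behaviour, engagement metrics, and churn risk indicators"),
--     ("subscriber", 4, "Examining customer behaviour, engagement metrics, and churn risk indicators"),
--     ("finance", 5, "Evaluating financial transactions, credit profiles, and risk exposure across segments"),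
--     ("bank", 5, "Evaluating financial transactions, credit profiles, and risk exposure across segments"),
--     ("loan", 5, "Evaluating financial transactions, credit profiles, and risk exposure across segments"),
--     ("credit", 5, "Evaluating financial transactions, credit profiles, and risk exposure across segments"),
--     ("transaction", 5, "Evaluating financial transactions, credit profiles, and risk exposure across segments"),
--     ("health", 6, "Investigating patient demographics, clinical outcomes, and healthcare utilisation patterns"),
--     ("medical", 6, "Investigating patient demographics, clinical outcomes, and healthcare utilisation patterns"),
--     ("patient", 6, "Investigating patient demographics, clinical outcomes, and healthcare utilisation patterns"),
--     ("hospital", 6, "Investigating patient demographics, clinical outcomes, and healthcare utilisation patterns"),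
--     ("disease", 6, "Investigating patient demographics, clinical outcomes, and healthcare utilisation patterns"),
--     ("marketing", 7, "Measuring campaign effectiveness, audience engagement, and conversion performance"),
--     ("campaign", 7, "Measuring campaign effectiveness, audience engagement, and conversion performance"),
--     ("ad", 7, "Measuring campaign effectiveness, audience engagement, and conversion performance"),
--     ("click", 7, "Measuring campaign effectiveness, audience engagement, and conversion performance"),
--     ("conversion", 7, "Measuring campaign effectiveness, audience engagement, and conversion performance"),
-- ]
--
--
-- def get_subtitle(topic):
--     # One pass over the flat keyword table: keep the hit with the smallest
--     # priority (argmin aggregation), instead of chained group tests.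
--     topic_lower = topic.lower()
--     best = None  # (priority, subtitle) of the best hit so far
--     for keyword, priority, subtitle in ITEMS:
--         if keyword in topic_lower and (best is None or priority < best[0]):
--             best = (priority, subtitle)
--     if best is None:
--         return f"A comprehensive data-driven analysis of {topic} — uncovering trends, patterns, and key metrics"
--     return best[1]
-- ===== Notes on version B (the rewrite author's own statement) =====
-- stated objective: alternative
-- what changed: Replaced the eight-branch elif chain of group membership tests with a single pass over one flat prioritized keyword table that keeps the minimum-priority hit (argmin aggregation, no group structure, no early return); correct because the first group with any match is exactly the matched keyword with the smallest priority.
import Mathlib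
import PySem

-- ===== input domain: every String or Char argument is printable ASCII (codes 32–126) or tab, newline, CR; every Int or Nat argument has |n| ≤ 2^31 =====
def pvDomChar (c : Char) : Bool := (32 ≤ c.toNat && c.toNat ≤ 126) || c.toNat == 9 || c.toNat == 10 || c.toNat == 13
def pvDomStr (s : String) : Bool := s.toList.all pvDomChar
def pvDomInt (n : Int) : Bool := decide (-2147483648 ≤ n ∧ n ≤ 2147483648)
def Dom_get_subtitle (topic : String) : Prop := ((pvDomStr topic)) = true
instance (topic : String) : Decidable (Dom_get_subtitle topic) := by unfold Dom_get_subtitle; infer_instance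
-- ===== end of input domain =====

-- ===== PORT A =====
-- B replaces A's elif chain of group tests by one argmin pass over a flat prioritized keyword table (alternative; same cost).
def get_subtitle (topic : String) : String :=
  let topic_lower := PySem.Str.lower topic
  if ["insurance", "policy", "claim", "premium", "coverage"].any (fun w => PySem.Str.isIn w topic_lower) then "Analysing policyholder profiles, claim patterns, and risk distribution across the portfolio"
  else
  if ["sales", "revenue", "profit", "order", "product"].any (fun w => PySem.Str.isIn w topic_lower) then "Tracking sales performance, revenue trends, and product-level insights across the dataset"
  else
  if ["spotify", "music", "song", "track", "artist", "playlist"].any (fun w => PySem.Str.isIn w topic_lower) then "Exploring streaming trends, artist performance, and audio feature patterns across tracks"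
  else
  if ["employee", "hr", "staff", "salary", "workforce", "attrition"].any (fun w => PySem.Str.isIn w topic_lower) then "Understanding workforce composition, compensation trends, and employee retention patterns"
  else
  if ["customer", "churn", "retention", "user", "subscriber"].any (fun w => PySem.Str.isIn w topic_lower) then "Examining customer behaviour, engagement metrics, and churn risk indicators"
  else
  if ["finance", "bank", "loan", "credit", "transaction"].any (fun w => PySem.Str.isIn w topic_lower) then "Evaluating financial transactions, credit profiles, and risk exposure across segments"
  else
  if ["health", "medical", "patient", "hospital", "disease"].any (fun w => PySem.Str.isIn w topic_lower) then "Investigating patient demographics, clinical outcomes, and healthcare utilisation patterns"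
  else
  if ["marketing", "campaign", "ad", "click", "conversion"].any (fun w => PySem.Str.isIn w topic_lower) then "Measuring campaign effectiveness, audience engagement, and conversion performance"
  else
  "A comprehensive data-driven analysis of " ++ topic ++ " — uncovering trends, patterns, and key metrics"

-- ===== PORT B =====
-- B's flat prioritized keyword table: (keyword, priority, subtitle)
def pvItems : List (String × Nat × String) :=
  [("insurance", 0, "Analysing policyholder profiles, claim patterns, and risk distribution across the portfolio"),
   ("policy", 0, "Analysing policyholder profiles, claim patterns, and risk distribution across the portfolio"),
   ("claim", 0, "Analysing policyholder profiles, claim patterns, and risk distribution across the portfolio"),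
   ("premium", 0, "Analysing policyholder profiles, claim patterns, and risk distribution across the portfolio"),
   ("coverage", 0, "Analysing policyholder profiles, claim patterns, and risk distribution across the portfolio"),
   ("sales", 1, "Tracking sales performance, revenue trends, and product-level insights across the dataset"),
   ("revenue", 1, "Tracking sales performance, revenue trends, and product-level insights across the dataset"),
   ("profit", 1, "Tracking sales performance, revenue trends, and product-level insights across the dataset"),
   ("order", 1, "Tracking sales performance, revenue trends, and product-level insights across the dataset"),
   ("product", 1, "Tracking sales performance, revenue trends, and product-level insights across the dataset"),
   ("spotify", 2, "Exploring streaming trends, artist performance, and audio feature patterns across tracks"),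
   ("music", 2, "Exploring streaming trends, artist performance, and audio feature patterns across tracks"),
   ("song", 2, "Exploring streaming trends, artist performance, and audio feature patterns across tracks"),
   ("track", 2, "Exploring streaming trends, artist performance, and audio feature patterns across tracks"),
   ("artist", 2, "Exploring streaming trends, artist performance, and audio feature patterns across tracks"),
   ("playlist", 2, "Exploring streaming trends, artist performance, and audio feature patterns across tracks"),
   ("employee", 3, "Understanding workforce composition, compensation trends, and employee retention patterns"),
   ("hr", 3, "Understanding workforce composition, compensation trends, and employee retention patterns"),
   ("staff", 3, "Understanding workforce composition, compensation trends, and employee retention patterns"),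
   ("salary", 3, "Understanding workforce composition, compensation trends, and employee retention patterns"),
   ("workforce", 3, "Understanding workforce composition, compensation trends, and employee retention patterns"),
   ("attrition", 3, "Understanding workforce composition, compensation trends, and employee retention patterns"),
   ("customer", 4, "Examining customer behaviour, engagement metrics, and churn risk indicators"),
   ("churn", 4, "Examining customer behaviour, engagement metrics, and churn risk indicators"),
   ("retention", 4, "Examining customer behaviour, engagement metrics, and churn risk indicators"),
   ("user", 4, "Examining customer behaviour, engagement metrics, and churn risk indicators"),
   ("subscriber", 4, "Examining customer behaviour, engagement metrics, and churn risk indicators"),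
   ("finance", 5, "Evaluating financial transactions, credit profiles, and risk exposure across segments"),
   ("bank", 5, "Evaluating financial transactions, credit profiles, and risk exposure across segments"),
   ("loan", 5, "Evaluating financial transactions, credit profiles, and risk exposure across segments"),
   ("credit", 5, "Evaluating financial transactions, credit profiles, and risk exposure across segments"),
   ("transaction", 5, "Evaluating financial transactions, credit profiles, and risk exposure across segments"),
   ("health", 6, "Investigating patient demographics, clinical outcomes, and healthcare utilisation patterns"),
   ("medical", 6, "Investigating patient demographics, clinical outcomes, and healthcare utilisation patterns"),
   ("patient", 6, "Investigating patient demographics, clinical outcomes, and healthcare utilisation patterns"),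
   ("hospital", 6, "Investigating patient demographics, clinical outcomes, and healthcare utilisation patterns"),
   ("disease", 6, "Investigating patient demographics, clinical outcomes, and healthcare utilisation patterns"),
   ("marketing", 7, "Measuring campaign effectiveness, audience engagement, and conversion performance"),
   ("campaign", 7, "Measuring campaign effectiveness, audience engagement, and conversion performance"),
   ("ad", 7, "Measuring campaign effectiveness, audience engagement, and conversion performance"),
   ("click", 7, "Measuring campaign effectiveness, audience engagement, and conversion performance"),
   ("conversion", 7, "Measuring campaign effectiveness, audience engagement, and conversion performance")]

-- B's loop body: update the best (smallest-priority) hit so far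
def pvStep (topic_lower : String) (best : Option (Nat × String)) (it : String × Nat × String) : Option (Nat × String) :=
  if PySem.Str.isIn it.1 topic_lower then
    match best with
    | none => some (it.2.1, it.2.2)
    | some (m, s) => if it.2.1 < m then some (it.2.1, it.2.2) else some (m, s)
  else best

def get_subtitle_alt (topic : String) : String :=
  let topic_lower := PySem.Str.lower topic
  match pvItems.foldl (pvStep topic_lower) none with
  | none => "A comprehensive data-driven analysis of " ++ topic ++ " — uncovering trends, patterns, and key metrics"
  | some (_, subtitle) => subtitle

-- ===== PRECONDITION & SPEC =====
def Spec_get_subtitle (topic : String) (out : String) : Prop := out = get_subtitle_alt topic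
instance (topic : String) (out : String) : Decidable (Spec_get_subtitle topic out) := by unfold Spec_get_subtitle; infer_instance

-- ===== CLAIM (what is proved, stated in full; the proofs are below) =====
def Claim_equal_get_subtitle : Prop := ∀ (topic : String), Dom_get_subtitle topic → Spec_get_subtitle topic (get_subtitle topic)

-- ===== LEMMAS AND PROOFS =====

-- first matching item of a flat table (reference form of B's fold)
def pvFirstHit (tl : String) : List (String × Nat × String) → Option (Nat × String)
  | [] => none
  | (kw, g, sub) :: rest =>
      if PySem.Str.isIn kw tl then some (g, sub) else pvFirstHit tl rest

theorem pvFoldl_step_const (tl : String) (m : Nat) (s : String) (l : List (String × Nat × String))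
    (h : ∀ it ∈ l, m ≤ it.2.1) :
    l.foldl (pvStep tl) (some (m, s)) = some (m, s) := by
  induction l with
  | nil => rfl
  | cons it rest ih =>
    obtain ⟨kw, g, sub⟩ := it
    have hm : m ≤ g := h _ (List.mem_cons_self)
    have hstep : pvStep tl (some (m, s)) (kw, g, sub) = some (m, s) := by
      simp only [pvStep]
      split_ifs with h1 h2
      · omega
      · rfl
      · rfl
    simp only [List.foldl, hstep]
    exact ih (fun it hit => h it (List.mem_cons_of_mem _ hit))

theorem pvFoldl_none_eq_firstHit (tl : String) (l : List (String × Nat × String))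
    (h : l.Pairwise (fun a b => a.2.1 ≤ b.2.1)) :
    l.foldl (pvStep tl) none = pvFirstHit tl l := by
  induction l with
  | nil => rfl
  | cons it rest ih =>
    obtain ⟨kw, g, sub⟩ := it
    rw [List.pairwise_cons] at h
    simp only [List.foldl, pvStep, pvFirstHit]
    by_cases hin : PySem.Str.isIn kw tl = true
    · simp only [hin, if_pos]
      exact pvFoldl_step_const tl g sub rest h.1
    · simp only [hin, if_neg, Bool.false_eq_true, not_false_eq_true]
      exact ih h.2

theorem pvFirstHit_append (tl : String) (l1 l2 : List (String × Nat × String)) :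
    pvFirstHit tl (l1 ++ l2) =
      (match pvFirstHit tl l1 with
       | some x => some x
       | none => pvFirstHit tl l2) := by
  induction l1 with
  | nil => rfl
  | cons it rest ih =>
    obtain ⟨kw, g, sub⟩ := it
    simp only [List.cons_append, pvFirstHit]
    by_cases hin : PySem.Str.isIn kw tl = true
    · rw [if_pos hin, if_pos hin]
    · rw [if_neg hin, if_neg hin, ih]

theorem pvFirstHit_group (tl : String) (g : Nat) (sub : String) (kws : List String) :
    pvFirstHit tl (kws.map (fun k => (k, g, sub))) =
      (if kws.any (fun k => PySem.Str.isIn k tl) then some (g, sub) else none) := by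
  induction kws with
  | nil => rfl
  | cons k rest ih =>
    simp only [List.map_cons, pvFirstHit, List.any_cons]
    by_cases hin : PySem.Str.isIn k tl = true
    · rw [if_pos hin]
      rw [PySem.Str.isIn_eq] at hin
      simp [hin]
    · have hf : PySem.Str.isIn k tl = false := Bool.eq_false_iff.mpr (fun h => hin h)
      rw [if_neg hin, ih]
      rw [PySem.Str.isIn_eq] at hf
      simp [hf]

-- pvItems as the concatenation of its eight constant-priority groups
theorem pvItems_eq :
    pvItems =
      (["insurance", "policy", "claim", "premium", "coverage"].map (fun k => (k, 0, "Analysing policyholder profiles, claim patterns, and risk distribution across the portfolio")))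
      ++ (["sales", "revenue", "profit", "order", "product"].map (fun k => (k, 1, "Tracking sales performance, revenue trends, and product-level insights across the dataset")))
      ++ (["spotify", "music", "song", "track", "artist", "playlist"].map (fun k => (k, 2, "Exploring streaming trends, artist performance, and audio feature patterns across tracks")))
      ++ (["employee", "hr", "staff", "salary", "workforce", "attrition"].map (fun k => (k, 3, "Understanding workforce composition, compensation trends, and employee retention patterns")))
      ++ (["customer", "churn", "retention", "user", "subscriber"].map (fun k => (k, 4, "Examining customer behaviour, engagement metrics, and churn risk indicators")))
      ++ (["finance", "bank", "loan", "credit", "transaction"].map (fun k => (k, 5, "Evaluating financial transactions, credit profiles, and risk exposure across segments")))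
      ++ (["health", "medical", "patient", "hospital", "disease"].map (fun k => (k, 6, "Investigating patient demographics, clinical outcomes, and healthcare utilisation patterns")))
      ++ (["marketing", "campaign", "ad", "click", "conversion"].map (fun k => (k, 7, "Measuring campaign effectiveness, audience engagement, and conversion performance"))) := by
  rfl

theorem pvItems_sorted : pvItems.Pairwise (fun a b => a.2.1 ≤ b.2.1) := by
  decide

-- ===== VERDICT (by name: the statement is the Claim_ definition above) =====
set_option maxHeartbeats 1000000 in
theorem get_subtitle_spec : Claim_equal_get_subtitle := by
  intro topic _
  unfold Spec_get_subtitle get_subtitle get_subtitle_alt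
  simp only [pvFoldl_none_eq_firstHit _ _ pvItems_sorted]
  rw [pvItems_eq]
  simp only [pvFirstHit_append, pvFirstHit_group]
  split_ifs <;> rfl
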